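-- pv_equiv track=rewrite | github.com/TamChonMan/Assest | backend/routers/transactions.py | _detect_currency_from_symbol
-- ===== SOURCE A (Python) =====
-- SYMBOL_CURRENCY_MAP = {
--     ".HK": "HKD",
--     ".TW": "TWD",
--     ".T": "JPY",
--     ".L": "GBP",
--     ".PA": "EUR",
--     ".DE": "EUR",
--     ".SS": "CNY",
--     ".SZ": "CNY",
-- }
--
-- def _detect_currency_from_symbol(symbol: str) -> str:
--     """Detect trading currency from Yahoo Finance symbol suffix."""
--     if not symbol:
--         return "USD"
--     symbol_upper = symbol.upper()
--     for suffix, currency in SYMBOL_CURRENCY_MAP.items():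
--         if symbol_upper.endswith(suffix.upper()):
--             return currency
--     # Crypto pairs like BTC-USD
--     if "-USD" in symbol_upper:
--         return "USD"
--     return "USD"  # Default for US stocks
-- ===== SOURCE B (Python) =====
-- _BARE = {"HK": "HKD", "TW": "TWD", "T": "JPY", "L": "GBP",
--          "PA": "EUR", "DE": "EUR", "SS": "CNY", "SZ": "CNY"}
--
-- def _detect_currency_from_symbol(symbol: str) -> str:
--     """Detect trading currency from Yahoo Finance symbol suffix."""
--     seg = None  # characters seen after the most recent '.'
--     for ch in symbol.upper():
--         if ch == '.':
--             seg = ''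
--         elif seg is not None:
--             seg = seg + ch
--     if seg is None:
--         return "USD"
--     return _BARE.get(seg, "USD")
-- ===== Notes on version B (the rewrite author's own statement) =====
-- stated objective: alternative
-- what changed: Replaces A's endswith-scan over the dotted-suffix map by a single left-to-right character pass that accumulates the segment after the last dot, then one lookup of that bare segment in a dot-free reverse map (no segment means no dot, so the default USD).
import Mathlib
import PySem

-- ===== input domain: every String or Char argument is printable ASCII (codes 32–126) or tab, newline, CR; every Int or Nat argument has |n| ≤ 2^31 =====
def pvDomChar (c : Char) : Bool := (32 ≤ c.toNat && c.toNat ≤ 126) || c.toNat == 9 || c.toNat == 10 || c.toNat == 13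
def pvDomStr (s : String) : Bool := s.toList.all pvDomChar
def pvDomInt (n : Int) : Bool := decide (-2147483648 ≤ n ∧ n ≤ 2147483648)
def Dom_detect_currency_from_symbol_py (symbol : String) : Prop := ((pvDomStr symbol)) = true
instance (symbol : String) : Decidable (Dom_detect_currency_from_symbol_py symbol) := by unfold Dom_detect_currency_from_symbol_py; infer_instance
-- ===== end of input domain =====

-- B replaces A's endswith-scan over the dotted-suffix map by one character pass that
-- accumulates the segment after the last '.', then a single lookup in a bare-suffix map.

-- ===== PORT A =====
def SYMBOL_CURRENCY_MAP : PySem.Dict String String :=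
  PySem.Dict.ofList [(".HK", "HKD"), (".TW", "TWD"), (".T", "JPY"), (".L", "GBP"),
   (".PA", "EUR"), (".DE", "EUR"), (".SS", "CNY"), (".SZ", "CNY")]

-- the for-loop over SYMBOL_CURRENCY_MAP.items() with early return is List.find?
def detect_currency_from_symbol_py (symbol : String) : String :=
  if symbol = "" then "USD"
  else
    let symbol_upper := PySem.Str.upper symbol
    match SYMBOL_CURRENCY_MAP.items.find?
        (fun p => PySem.Str.endswith symbol_upper (PySem.Str.upper p.1)) with
    | some p => p.2
    | none => if PySem.Str.isIn "-USD" symbol_upper then "USD" else "USD"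

-- ===== PORT B =====
def pvBARE : PySem.Dict String String :=
  PySem.Dict.ofList [("HK", "HKD"), ("TW", "TWD"), ("T", "JPY"), ("L", "GBP"),
   ("PA", "EUR"), ("DE", "EUR"), ("SS", "CNY"), ("SZ", "CNY")]

-- the loop body: seg = None initially; on '.', reset to ''; otherwise append if tracking
def pvStep (seg : Option (List Char)) (ch : Char) : Option (List Char) :=
  if ch = '.' then some []
  else match seg with
       | none => none
       | some s => some (s ++ [ch])

def detect_currency_from_symbol_py_alt (symbol : String) : String :=
  match (PySem.Str.upper symbol).toList.foldl pvStep none with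
  | none => "USD"
  | some seg => pvBARE.getD (String.ofList seg) "USD"

-- ===== PRECONDITION & SPEC =====
def Spec_detect_currency_from_symbol_py (symbol : String) (out : String) : Prop := out = detect_currency_from_symbol_py_alt symbol
instance (symbol : String) (out : String) : Decidable (Spec_detect_currency_from_symbol_py symbol out) := by unfold Spec_detect_currency_from_symbol_py; infer_instance

-- ===== CLAIM (what is proved, stated in full; the proofs are below) =====
def Claim_equal_detect_currency_from_symbol_py : Prop := ∀ (symbol : String), Dom_detect_currency_from_symbol_py symbol → Spec_detect_currency_from_symbol_py symbol (detect_currency_from_symbol_py symbol)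

-- ===== LEMMAS AND PROOFS =====

-- chars before the first '.' of a list, if it contains a dot (the reverse view of the fold)
def pvFirst : List Char → Option (List Char)
  | [] => none
  | c :: cs => if c = '.' then some [] else (pvFirst cs).map (c :: ·)

lemma foldl_step_concat (l : List Char) (c : Char) :
    (l ++ [c]).foldl pvStep none =
      if c = '.' then some [] else (l.foldl pvStep none).map (· ++ [c]) := by
  rw [List.foldl_append]
  cases h : l.foldl pvStep none <;> simp [pvStep, List.foldl]

lemma foldl_step_eq_first (l : List Char) :
    l.foldl pvStep none = (pvFirst l.reverse).map List.reverse := by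
  induction l using List.reverseRecOn with
  | nil => simp [pvFirst]
  | append_singleton l c ih =>
    rw [foldl_step_concat, List.reverse_append]
    simp only [List.reverse_singleton, List.singleton_append, pvFirst]
    split_ifs with hc
    · simp
    · rw [ih]
      cases pvFirst l.reverse <;> simp

lemma first_some_iff (r : List Char) : ∀ (m : List Char), '.' ∉ m → (pvFirst r = some m ↔ (m ++ ['.']) <+: r) := by
  induction r with
  | nil => intro m _; simp [pvFirst]
  | cons c cs ih =>
    intro m hm
    simp only [pvFirst]
    by_cases hc : c = '.'
    · subst hc
      rw [if_pos rfl]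
      cases m with
      | nil => simp
      | cons d m' =>
        constructor
        · intro h; exact absurd h (by simp)
        · intro h
          exfalso
          have hd : d = '.' := (List.cons_prefix_cons.mp (by simpa using h)).1
          exact hm (by simp [hd])
    · rw [if_neg hc]
      cases m with
      | nil =>
        constructor
        · intro h
          exfalso; cases hf : pvFirst cs <;> rw [hf] at h <;> simp at h
        · intro h
          have hdc : ('.' : Char) = c := by simpa using h
          exact absurd hdc.symm hc
      | cons d m' =>
        have hm' : '.' ∉ m' := fun hx => hm (List.mem_cons_of_mem _ hx)
        constructor
        · intro h
          cases hf : pvFirst cs with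
          | none => rw [hf] at h; simp at h
          | some x =>
            rw [hf] at h
            simp only [Option.map_some, Option.some.injEq] at h
            injection h with hcd hx
            subst hcd; subst hx
            have hx' : '.' ∉ x := fun hxx => hm (List.mem_cons_of_mem _ hxx)
            rw [List.cons_append]
            exact List.cons_prefix_cons.mpr ⟨rfl, (ih x hx').mp hf⟩
        · intro h
          obtain ⟨hd, hrest⟩ := List.cons_prefix_cons.mp (by simpa using h)
          rw [(ih m' hm').mpr hrest]
          simp [hd]

lemma ends_iff (u k : List Char) (hk : '.' ∉ k) :
    PySem.Chars.endswith u ('.' :: k) = decide (u.foldl pvStep none = some k) := by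
  rw [foldl_step_eq_first]
  have h1 : PySem.Chars.endswith u ('.' :: k) = true ↔ ('.' :: k) <:+ u :=
    PySem.Chars.endswith_iff u ('.' :: k)
  have h2 : ('.' :: k) <:+ u ↔ (k.reverse ++ ['.']) <+: u.reverse := by
    rw [← List.reverse_prefix]; simp
  have hk' : '.' ∉ k.reverse := by simpa using hk
  have h3 : (k.reverse ++ ['.']) <+: u.reverse ↔ pvFirst u.reverse = some k.reverse :=
    (first_some_iff u.reverse k.reverse hk').symm
  have h4 : pvFirst u.reverse = some k.reverse ↔
      (pvFirst u.reverse).map List.reverse = some k := by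
    cases pvFirst u.reverse with
    | none => simp
    | some v =>
      simp only [Option.map_some, Option.some.injEq]
      constructor
      · intro h; simp [h]
      · intro h; simpa using congrArg List.reverse h
  by_cases h : (pvFirst u.reverse).map List.reverse = some k
  · simp only [h, decide_true]
    exact h1.mpr (h2.mpr (h3.mpr (h4.mpr h)))
  · simp only [h, decide_false]
    rw [← Bool.not_eq_true]
    exact fun hb => h (h4.mp (h3.mp (h2.mp (h1.mp hb))))

lemma beq_str (a b : String) : (a == b) = decide (a = b) := rfl

set_option maxHeartbeats 2000000 in
theorem pv_main (s : String) (hs : ¬ s = "") :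
    detect_currency_from_symbol_py s = detect_currency_from_symbol_py_alt s := by
  unfold detect_currency_from_symbol_py detect_currency_from_symbol_py_alt
  rw [if_neg hs]
  set u := (PySem.Str.upper s).toList with hu
  have e1 : PySem.Str.endswith (PySem.Str.upper s) ".HK" = decide (u.foldl pvStep none = some ['H','K']) := by
    rw [PySem.Str.endswith_eq, ← hu, show (".HK" : String).toList = '.' :: ['H','K'] from rfl]
    exact ends_iff u ['H','K'] (by decide)
  have e2 : PySem.Str.endswith (PySem.Str.upper s) ".TW" = decide (u.foldl pvStep none = some ['T','W']) := by
    rw [PySem.Str.endswith_eq, ← hu, show (".TW" : String).toList = '.' :: ['T','W'] from rfl]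
    exact ends_iff u ['T','W'] (by decide)
  have e3 : PySem.Str.endswith (PySem.Str.upper s) ".T" = decide (u.foldl pvStep none = some ['T']) := by
    rw [PySem.Str.endswith_eq, ← hu, show (".T" : String).toList = '.' :: ['T'] from rfl]
    exact ends_iff u ['T'] (by decide)
  have e4 : PySem.Str.endswith (PySem.Str.upper s) ".L" = decide (u.foldl pvStep none = some ['L']) := by
    rw [PySem.Str.endswith_eq, ← hu, show (".L" : String).toList = '.' :: ['L'] from rfl]
    exact ends_iff u ['L'] (by decide)
  have e5 : PySem.Str.endswith (PySem.Str.upper s) ".PA" = decide (u.foldl pvStep none = some ['P','A']) := by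
    rw [PySem.Str.endswith_eq, ← hu, show (".PA" : String).toList = '.' :: ['P','A'] from rfl]
    exact ends_iff u ['P','A'] (by decide)
  have e6 : PySem.Str.endswith (PySem.Str.upper s) ".DE" = decide (u.foldl pvStep none = some ['D','E']) := by
    rw [PySem.Str.endswith_eq, ← hu, show (".DE" : String).toList = '.' :: ['D','E'] from rfl]
    exact ends_iff u ['D','E'] (by decide)
  have e7 : PySem.Str.endswith (PySem.Str.upper s) ".SS" = decide (u.foldl pvStep none = some ['S','S']) := by
    rw [PySem.Str.endswith_eq, ← hu, show (".SS" : String).toList = '.' :: ['S','S'] from rfl]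
    exact ends_iff u ['S','S'] (by decide)
  have e8 : PySem.Str.endswith (PySem.Str.upper s) ".SZ" = decide (u.foldl pvStep none = some ['S','Z']) := by
    rw [PySem.Str.endswith_eq, ← hu, show (".SZ" : String).toList = '.' :: ['S','Z'] from rfl]
    exact ends_iff u ['S','Z'] (by decide)
  have hitems : SYMBOL_CURRENCY_MAP.items = [(".HK", "HKD"), (".TW", "TWD"), (".T", "JPY"),
      (".L", "GBP"), (".PA", "EUR"), (".DE", "EUR"), (".SS", "CNY"), (".SZ", "CNY")] := rfl
  rw [hitems]
  simp only [List.find?,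
    show PySem.Str.upper ".HK" = ".HK" from by decide,
    show PySem.Str.upper ".TW" = ".TW" from by decide,
    show PySem.Str.upper ".T" = ".T" from by decide,
    show PySem.Str.upper ".L" = ".L" from by decide,
    show PySem.Str.upper ".PA" = ".PA" from by decide,
    show PySem.Str.upper ".DE" = ".DE" from by decide,
    show PySem.Str.upper ".SS" = ".SS" from by decide,
    show PySem.Str.upper ".SZ" = ".SZ" from by decide,
    e1, e2, e3, e4, e5, e6, e7, e8]
  cases hf : u.foldl pvStep none with
  | none => simp
  | some seg =>
    by_cases h1 : seg = ['H','K']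
    · subst h1
      have hr : pvBARE.getD (String.ofList ['H','K']) "USD" = "HKD" := by decide
      simp [hr]
    by_cases h2 : seg = ['T','W']
    · subst h2
      have hr : pvBARE.getD (String.ofList ['T','W']) "USD" = "TWD" := by decide
      simp [hr]
    by_cases h3 : seg = ['T']
    · subst h3
      have hr : pvBARE.getD (String.ofList ['T']) "USD" = "JPY" := by decide
      simp [hr]
    by_cases h4 : seg = ['L']
    · subst h4
      have hr : pvBARE.getD (String.ofList ['L']) "USD" = "GBP" := by decide
      simp [hr]
    by_cases h5 : seg = ['P','A']
    · subst h5
      have hr : pvBARE.getD (String.ofList ['P','A']) "USD" = "EUR" := by decide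
      simp [hr]
    by_cases h6 : seg = ['D','E']
    · subst h6
      have hr : pvBARE.getD (String.ofList ['D','E']) "USD" = "EUR" := by decide
      simp [hr]
    by_cases h7 : seg = ['S','S']
    · subst h7
      have hr : pvBARE.getD (String.ofList ['S','S']) "USD" = "CNY" := by decide
      simp [hr]
    by_cases h8 : seg = ['S','Z']
    · subst h8
      have hr : pvBARE.getD (String.ofList ['S','Z']) "USD" = "CNY" := by decide
      simp [hr]
    · have hbare : pvBARE.items = [("HK", "HKD"), ("TW", "TWD"), ("T", "JPY"), ("L", "GBP"),
          ("PA", "EUR"), ("DE", "EUR"), ("SS", "CNY"), ("SZ", "CNY")] := rfl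
      have mkni : ∀ (t : String) (l : List Char), t.toList = l → seg ≠ l →
          (t == String.ofList seg) = false := by
        intro t l htl hne
        rw [beq_str]
        exact decide_eq_false (fun h => hne (by
          have := congrArg String.toList h
          rw [htl] at this
          simpa using this.symm))
      have b1 := mkni "HK" ['H','K'] rfl h1
      have b2 := mkni "TW" ['T','W'] rfl h2
      have b3 := mkni "T" ['T'] rfl h3
      have b4 := mkni "L" ['L'] rfl h4
      have b5 := mkni "PA" ['P','A'] rfl h5
      have b6 := mkni "DE" ['D','E'] rfl h6
      have b7 := mkni "SS" ['S','S'] rfl h7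
      have b8 := mkni "SZ" ['S','Z'] rfl h8
      simp [List.find?, h1, h2, h3, h4, h5, h6, h7, h8,
        PySem.Dict.getD, PySem.Dict.get?, hbare, b1, b2, b3, b4, b5, b6, b7, b8]

-- ===== VERDICT (by name: the statement is the Claim_ definition above) =====
theorem detect_currency_from_symbol_py_spec : Claim_equal_detect_currency_from_symbol_py := by
  intro s _
  unfold Spec_detect_currency_from_symbol_py
  by_cases hs : s = ""
  · subst hs; decide
  · exact pv_main s hs
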